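-- pv_equiv track=rewrite | github.com/DiegoAvellanedaCortes/UpdatePython | clase15_generadores_Iteradores.py | num_pares
-- ===== SOURCE A (Python) =====
-- def num_pares(par,limite):
--     a=0
--     while a<limite+1:
--         if par==True:
--             if a % 2==0:
--                 yield a
--         elif par==False:
--             if a % 2!=0:
--                 yield a
--         a+=1
-- ===== SOURCE B (Python) =====
-- def num_pares(par, limite):
--     if par == True:
--         yield from range(0, limite + 1, 2)
--     elif par == False:
--         yield from range(1, limite + 1, 2)
-- ===== Notes on version B (the rewrite author's own statement) =====
-- stated objective: idiomatic
-- what changed: Instead of scanning every integer 0..limite and testing a % 2 inside a unit-step while loop, B yields the selected parity class directly as an arithmetic progression (range with step 2), keeping the exact par==True/par==False branching.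
import Mathlib
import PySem

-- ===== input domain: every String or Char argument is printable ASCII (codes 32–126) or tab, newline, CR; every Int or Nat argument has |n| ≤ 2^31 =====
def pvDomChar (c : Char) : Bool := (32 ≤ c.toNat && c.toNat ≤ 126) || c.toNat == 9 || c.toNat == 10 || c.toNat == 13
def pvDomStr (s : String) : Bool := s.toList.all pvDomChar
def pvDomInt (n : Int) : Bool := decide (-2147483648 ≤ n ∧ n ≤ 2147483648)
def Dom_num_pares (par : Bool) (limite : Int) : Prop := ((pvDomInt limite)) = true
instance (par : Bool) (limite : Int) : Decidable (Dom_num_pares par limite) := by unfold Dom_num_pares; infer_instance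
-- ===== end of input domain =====

-- B replaces the unit-step while loop with a parity test by direct iteration over the
-- selected arithmetic progression (range with step 2); idiomatic, same results.

-- ===== PORT A =====
-- while a < limite+1: ... a += 1  ==> fold over the integers 0, 1, ..., limite
def num_pares (par : Bool) (limite : Int) : List Int :=
  (PySem.List.pyRange 0 (limite + 1) 1).foldl
    (fun acc a =>
      if par = true then
        if PySem.Int.mod a 2 = 0 then acc ++ [a] else acc
      else if par = false then
        if PySem.Int.mod a 2 ≠ 0 then acc ++ [a] else acc
      else acc) []

-- ===== PORT B =====
def num_pares_alt (par : Bool) (limite : Int) : List Int :=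
  if par = true then PySem.List.pyRange 0 (limite + 1) 2
  else if par = false then PySem.List.pyRange 1 (limite + 1) 2
  else []

-- ===== PRECONDITION & SPEC =====
def Spec_num_pares (par : Bool) (limite : Int) (out : List Int) : Prop := out = num_pares_alt par limite
instance (par : Bool) (limite : Int) (out : List Int) : Decidable (Spec_num_pares par limite out) := by unfold Spec_num_pares; infer_instance

-- ===== CLAIM (what is proved, stated in full; the proofs are below) =====
def Claim_equal_num_pares : Prop := ∀ (par : Bool) (limite : Int), Dom_num_pares par limite → Spec_num_pares par limite (num_pares par limite)

-- ===== LEMMAS AND PROOFS =====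

-- folding "append if p" is filtering
theorem pv_foldl_filt (p : Int → Prop) [DecidablePred p] (l : List Int) (acc : List Int) :
    l.foldl (fun acc x => if p x then acc ++ [x] else acc) acc
      = acc ++ l.filter (fun x => decide (p x)) := by
  induction l generalizing acc with
  | nil => simp
  | cons y ys ih =>
      by_cases h : p y <;> simp [List.foldl_cons, h, ih]

-- a strictly increasing list whose members are exactly those of range(a, b, 2) IS that range
theorem pv_eq_pyRange_two (l : List Int) (a b : Int)
    (hs : l.Pairwise (· < ·))
    (hm : ∀ x, x ∈ l ↔ (a ≤ x ∧ x < b ∧ (2 : Int) ∣ x - a)) :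
    l = PySem.List.pyRange a b 2 := by
  have hs2 : (PySem.List.pyRange a b 2).Pairwise (· < ·) := by
    rw [PySem.List.pyRange_of_pos a b (by norm_num)]
    rw [List.pairwise_map]
    exact List.pairwise_lt_range.imp (by intro k1 k2 h; omega)
  have hperm : l.Perm (PySem.List.pyRange a b 2) := by
    rw [List.perm_ext_iff_of_nodup (hs.imp ne_of_lt) (hs2.imp ne_of_lt)]
    intro x
    rw [hm, PySem.List.mem_pyRange_iff_of_pos (by norm_num)]
  exact List.Perm.eq_of_pairwise (fun _ _ _ _ h1 h2 => absurd h2 (lt_asymm h1)) hs hs2 hperm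

theorem pv_filter_pyRange_even (b : Int) :
    (PySem.List.pyRange 0 b 1).filter (fun x => decide (PySem.Int.mod x 2 = 0))
      = PySem.List.pyRange 0 b 2 := by
  apply pv_eq_pyRange_two
  · exact List.Pairwise.filter _ (PySem.List.pairwise_lt_pyRange_one _ _)
  · intro x
    simp only [List.mem_filter, PySem.List.mem_pyRange_one, decide_eq_true_eq,
      PySem.Int.mod, Int.fmod_eq_emod]
    omega

theorem pv_filter_pyRange_odd (b : Int) :
    (PySem.List.pyRange 0 b 1).filter (fun x => decide (¬ PySem.Int.mod x 2 = 0))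
      = PySem.List.pyRange 1 b 2 := by
  apply pv_eq_pyRange_two
  · exact List.Pairwise.filter _ (PySem.List.pairwise_lt_pyRange_one _ _)
  · intro x
    simp only [List.mem_filter, PySem.List.mem_pyRange_one, decide_eq_true_eq,
      PySem.Int.mod, Int.fmod_eq_emod]
    omega

-- ===== VERDICT (by name: the statement is the Claim_ definition above) =====
theorem num_pares_spec : Claim_equal_num_pares := by
  intro par limite _
  unfold Spec_num_pares num_pares num_pares_alt
  cases par
  · simp only [Bool.false_eq_true, if_false, reduceIte]
    rw [pv_foldl_filt (fun x => PySem.Int.mod x 2 ≠ 0)]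
    simpa using pv_filter_pyRange_odd (limite + 1)
  · simp only [Bool.true_eq_false, if_false, reduceIte]
    rw [pv_foldl_filt (fun x => PySem.Int.mod x 2 = 0)]
    simpa using pv_filter_pyRange_even (limite + 1)
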